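-- pv_equiv track=rewrite | github.com/snowykami/MeloParticleApi | mp_api/soma.py | connect_points
-- ===== SOURCE A (Python) =====
-- from typing import List, Tuple
--
-- def connect_points(start_num: int,
--                    end_num: int
--                    ) -> List[Tuple[int, int]]:
--     connections = []
--     if start_num >= end_num:
--         # Each end point connects to one start point
--         for i in range(end_num):
--             connections.append((i, i))
--     else:
--         # Some start points connect to multiple end points
--         each_num = end_num // start_num
--         remainder = end_num % start_num
--         for i in range(start_num):
--             for j in range(each_num + (i < remainder)):
--                 connections.append((i, i * each_num + j + min(i, remainder)))
--     return connections
-- ===== SOURCE B (Python) =====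
-- from typing import List, Tuple
--
-- def connect_points(start_num: int,
--                    end_num: int
--                    ) -> List[Tuple[int, int]]:
--     if start_num >= end_num:
--         # each end point pairs with the start point of the same index
--         return [(k, k) for k in range(end_num)]
--     each_num, remainder = divmod(end_num, start_num)
--     boundary = remainder * (each_num + 1)
--     out = []
--     for k in range(end_num):
--         if k < boundary:
--             i = k // (each_num + 1)
--         else:
--             i = remainder + (k - boundary) // each_num
--         out.append((i, k))
--     return out
-- ===== Notes on version B (the rewrite author's own statement) =====
-- stated objective: alternative
-- what changed: Replaces A's nested source-then-target loops with a single flat pass over the targets, recovering each target's source by a closed-form division-based group inversion; Pre_ excludes nonpositive start_num with positive end_num, outside the natural domain of source counts, where A raises ZeroDivisionError (start_num = 0) or returns an accidental empty list from range over a negative count.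
-- outside the precondition, e.g. on connect_points(-2, 5): A returns [], B returns [(0, 0), (-1, 1), (-1, 2), (-2, 3), (-2, 4)]; on connect_points(0, 3): A raises ZeroDivisionError, B raises ZeroDivisionError
import Mathlib
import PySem

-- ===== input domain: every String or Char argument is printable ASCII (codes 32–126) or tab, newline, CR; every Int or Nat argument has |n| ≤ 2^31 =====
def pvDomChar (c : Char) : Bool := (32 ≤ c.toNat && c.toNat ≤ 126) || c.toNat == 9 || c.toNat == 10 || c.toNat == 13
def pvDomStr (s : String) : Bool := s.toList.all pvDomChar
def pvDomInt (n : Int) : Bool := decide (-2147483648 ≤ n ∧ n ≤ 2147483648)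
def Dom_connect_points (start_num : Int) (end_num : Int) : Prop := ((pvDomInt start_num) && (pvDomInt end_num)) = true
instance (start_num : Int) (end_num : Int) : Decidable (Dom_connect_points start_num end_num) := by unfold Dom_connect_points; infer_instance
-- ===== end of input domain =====

-- B replaces A's nested source-then-target loops by one flat pass over the targets,
-- recovering each target's source with a closed-form division-based inversion (alternative decomposition).

-- ===== PORT A =====
def connect_points (start_num : Int) (end_num : Int) : List (Int × Int) :=
  if start_num ≥ end_num then
    (PySem.List.pyRange 0 end_num 1).foldl (fun acc i => acc ++ [(i, i)]) []
  else
    let each_num := PySem.Int.floordiv end_num start_num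
    let remainder := PySem.Int.mod end_num start_num
    (PySem.List.pyRange 0 start_num 1).foldl (fun acc i =>
      (PySem.List.pyRange 0 (each_num + (if i < remainder then 1 else 0)) 1).foldl
        (fun acc2 j => acc2 ++ [(i, i * each_num + j + min i remainder)]) acc) []

-- ===== PORT B =====
def connect_points_alt (start_num : Int) (end_num : Int) : List (Int × Int) :=
  if start_num ≥ end_num then
    (PySem.List.pyRange 0 end_num 1).map (fun k => (k, k))
  else
    let each_num := PySem.Int.floordiv end_num start_num
    let remainder := PySem.Int.mod end_num start_num
    let boundary := remainder * (each_num + 1)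
    (PySem.List.pyRange 0 end_num 1).foldl (fun acc k =>
      acc ++ [(if k < boundary then PySem.Int.floordiv k (each_num + 1)
               else remainder + PySem.Int.floordiv (k - boundary) each_num, k)]) []

-- ===== PRECONDITION & SPEC =====
-- Pre_ restricts to the natural domain of source counts when there are targets: start_num = 0
-- with 0 < end_num raises ZeroDivisionError in A, and a negative start_num with positive
-- end_num is outside the natural domain (A's empty list there is an accident of range over a
-- negative count; B's arithmetic inversion is not meaningful for a nonpositive source count).
def Pre_connect_points (start_num : Int) (end_num : Int) : Prop :=
  ¬ (start_num ≤ 0 ∧ 0 < end_num)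
instance (start_num : Int) (end_num : Int) : Decidable (Pre_connect_points start_num end_num) := by
  unfold Pre_connect_points; infer_instance

def pvWitness_connect_points : Int × Int := (3, 7)

def Spec_connect_points (start_num : Int) (end_num : Int) (out : List (Int × Int)) : Prop := out = connect_points_alt start_num end_num
instance (start_num : Int) (end_num : Int) (out : List (Int × Int)) : Decidable (Spec_connect_points start_num end_num out) := by unfold Spec_connect_points; infer_instance

-- ===== CLAIM (what is proved, stated in full; the proofs are below) =====
def Claim_equal_connect_points : Prop := ∀ (start_num : Int) (end_num : Int), Dom_connect_points start_num end_num → Pre_connect_points start_num end_num → Spec_connect_points start_num end_num (connect_points start_num end_num)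

-- ===== LEMMAS AND PROOFS =====

-- the inversion: for a target t in source i's block, B's closed form recovers i
theorem pv_inv_eq (q r i j : Int) (hq : 1 ≤ q) (_hr : 0 ≤ r)
    (hj0 : 0 ≤ j) (hj : j < q + (if i < r then 1 else 0)) (_hi0 : 0 ≤ i) :
    (if i * q + j + min i r < r * (q + 1)
       then PySem.Int.floordiv (i * q + j + min i r) (q + 1)
       else r + PySem.Int.floordiv (i * q + j + min i r - r * (q + 1)) q) = i := by
  by_cases hir : i < r
  · have hmin : min i r = i := min_eq_left (le_of_lt hir)
    have hlt : i * q + j + min i r < r * (q + 1) := by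
      rw [hmin]
      have : (i + 1) * (q + 1) ≤ r * (q + 1) := by
        apply mul_le_mul_of_nonneg_right (by omega) (by omega)
      simp only [if_pos hir] at hj
      nlinarith
    rw [if_pos hlt, PySem.Int.floordiv_eq_iff_of_pos (show (0:Int) < q + 1 by omega)]
    simp only [if_pos hir] at hj
    constructor <;> nlinarith
  · have hmin : min i r = r := min_eq_right (by omega)
    have hge : ¬ (i * q + j + min i r < r * (q + 1)) := by
      rw [hmin]
      have : r * q ≤ i * q := mul_le_mul_of_nonneg_right (by omega) (by omega)
      nlinarith
    rw [if_neg hge, hmin]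
    simp only [if_neg hir] at hj
    have harith : i * q + j + r - r * (q + 1) = (i - r) * q + j := by ring
    have hd : PySem.Int.floordiv ((i - r) * q + j) q = i - r :=
      (PySem.Int.floordiv_eq_iff_of_pos (show (0:Int) < q by omega)).mpr
        ⟨by nlinarith, by nlinarith⟩
    rw [harith, hd]; ring

-- one block of A equals the corresponding segment of B's flat pass
theorem pv_block_eq (q r i : Int) (hq : 1 ≤ q) (hr : 0 ≤ r) (hi0 : 0 ≤ i) :
    (PySem.List.pyRange 0 (q + (if i < r then 1 else 0)) 1).map
        (fun j => (i, i * q + j + min i r)) =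
    (PySem.List.pyRange (i * q + min i r) (i * q + min i r + (q + (if i < r then 1 else 0))) 1).map
        (fun k => ((if k < r * (q + 1)
                     then PySem.Int.floordiv k (q + 1)
                     else r + PySem.Int.floordiv (k - r * (q + 1)) q), k)) := by
  rw [PySem.List.pyRange_one, PySem.List.pyRange_one]
  have harg : (i * q + min i r + (q + (if i < r then 1 else 0)) - (i * q + min i r)) = (q + (if i < r then 1 else 0) - 0) := by ring_nf
  rw [harg]
  rw [List.map_map, List.map_map]
  apply List.map_congr_left
  intro k hk
  have hk' : (k : Int) < q + (if i < r then 1 else 0) := by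
    have := List.mem_range.mp hk
    have h2 : (k : Int) < ((q + (if i < r then 1 else 0) - 0).toNat : Int) := by exact_mod_cast this
    have h3 : (0:Int) ≤ q + (if i < r then 1 else 0) := by split_ifs <;> omega
    omega
  simp only [Function.comp, zero_add]
  have hinv := pv_inv_eq q r i (k:Int) hq hr (Int.natCast_nonneg k) hk' hi0
  rw [show i * q + min i r + (k:Int) = i * q + (k:Int) + min i r from by ring, hinv]

-- A's nested loop, flattened block by block: induction over the number of sources consumed
theorem pv_main (s e : Int) (hs : 0 < s) (hse : s < e) :
    ∀ (n : Nat), (n : Int) ≤ s →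
      (PySem.List.pyRange 0 (n : Int) 1).flatMap
          (fun i => (PySem.List.pyRange 0 (PySem.Int.floordiv e s + (if i < PySem.Int.mod e s then 1 else 0)) 1).map
            (fun j => (i, i * PySem.Int.floordiv e s + j + min i (PySem.Int.mod e s)))) =
      (PySem.List.pyRange 0 ((n : Int) * PySem.Int.floordiv e s + min (n : Int) (PySem.Int.mod e s)) 1).map
          (fun k => ((if k < PySem.Int.mod e s * (PySem.Int.floordiv e s + 1)
                       then PySem.Int.floordiv k (PySem.Int.floordiv e s + 1)
                       else PySem.Int.mod e s + PySem.Int.floordiv (k - PySem.Int.mod e s * (PySem.Int.floordiv e s + 1)) (PySem.Int.floordiv e s)), k)) := by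
  set q := PySem.Int.floordiv e s with hqdef
  set r := PySem.Int.mod e s with hrdef
  have hr0 : 0 ≤ r := PySem.Int.mod_nonneg e hs
  have hrs : r < s := PySem.Int.mod_lt e hs
  have hqs : q * s + r = e := PySem.Int.floordiv_mul_add_mod e s
  have hq1 : 1 ≤ q := by nlinarith
  intro n
  induction n with
  | zero => intro _; simp [PySem.List.pyRange_zero]
  | succ m ih =>
    intro hn
    have hm : (m : Int) ≤ s := by push_cast at hn ⊢; omega
    have hcast : ((m + 1 : Nat) : Int) = (m : Int) + 1 := by push_cast; ring
    rw [hcast, PySem.List.pyRange_one_succ_right (Int.natCast_nonneg m),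
        List.flatMap_append, ih hm]
    have hoff0 : (0:Int) ≤ (m : Int) * q + min (m : Int) r := by
      have h1 : (0:Int) ≤ (m : Int) * q := mul_nonneg (Int.natCast_nonneg m) (by omega)
      have h2 : (0:Int) ≤ min (m : Int) r := le_min (Int.natCast_nonneg m) hr0
      linarith
    have hoffs : ((m : Int) + 1) * q + min ((m : Int) + 1) r
               = (m : Int) * q + min (m : Int) r + (q + (if (m : Int) < r then 1 else 0)) := by
      by_cases h : (m : Int) < r
      · rw [min_eq_left (by omega), min_eq_left (by omega), if_pos h]; ring
      · rw [min_eq_right (by omega), min_eq_right (by omega), if_neg h]; ring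
    rw [hoffs,
        PySem.List.pyRange_one_append 0 ((m : Int) * q + min (m : Int) r)
          ((m : Int) * q + min (m : Int) r + (q + (if (m : Int) < r then 1 else 0)))
          hoff0 (by split_ifs <;> omega),
        List.map_append]
    congr 1
    simp only [List.flatMap_cons, List.flatMap_nil, List.append_nil]
    exact pv_block_eq q r (m : Int) hq1 hr0 (Int.natCast_nonneg m)

-- ===== VERDICT (by name: the statement is the Claim_ definition above) =====
theorem connect_points_spec : Claim_equal_connect_points := by
  intro s e _ hpre
  unfold Spec_connect_points connect_points connect_points_alt
  by_cases hge : s ≥ e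
  · rw [if_pos hge, if_pos hge, PySem.List.foldl_append_singleton_eq_map, List.nil_append]
  · rw [if_neg hge, if_neg hge]
    by_cases hs0 : s ≤ 0
    · -- Pre_ then forces e ≤ 0: both ranges are empty
      have he0 : e ≤ 0 := by
        unfold Pre_connect_points at hpre; omega
      rw [PySem.List.pyRange_one_eq_nil hs0, PySem.List.pyRange_one_eq_nil he0]
      simp
    · have hs : 0 < s := by omega
      have hse : s < e := by omega
      -- flatten A's nested append-loops, then apply the segment correspondence
      have hinner : ∀ (i : Int) (acc : List (Int × Int)),
          (PySem.List.pyRange 0 (PySem.Int.floordiv e s + (if i < PySem.Int.mod e s then 1 else 0)) 1).foldl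
            (fun acc2 j => acc2 ++ [(i, i * PySem.Int.floordiv e s + j + min i (PySem.Int.mod e s))]) acc
          = acc ++ (PySem.List.pyRange 0 (PySem.Int.floordiv e s + (if i < PySem.Int.mod e s then 1 else 0)) 1).map
              (fun j => (i, i * PySem.Int.floordiv e s + j + min i (PySem.Int.mod e s))) := by
        intro i acc
        exact PySem.List.foldl_append_singleton_eq_map _ _ _
      calc (PySem.List.pyRange 0 s 1).foldl (fun acc i =>
              (PySem.List.pyRange 0 (PySem.Int.floordiv e s + (if i < PySem.Int.mod e s then 1 else 0)) 1).foldl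
                (fun acc2 j => acc2 ++ [(i, i * PySem.Int.floordiv e s + j + min i (PySem.Int.mod e s))]) acc) []
          = (PySem.List.pyRange 0 s 1).foldl (fun acc i =>
              acc ++ (PySem.List.pyRange 0 (PySem.Int.floordiv e s + (if i < PySem.Int.mod e s then 1 else 0)) 1).map
                (fun j => (i, i * PySem.Int.floordiv e s + j + min i (PySem.Int.mod e s)))) [] := by
            exact PySem.List.foldl_congr_mem _ _ _ _ (fun acc i _ => hinner i acc)
        _ = (PySem.List.pyRange 0 s 1).flatMap
              (fun i => (PySem.List.pyRange 0 (PySem.Int.floordiv e s + (if i < PySem.Int.mod e s then 1 else 0)) 1).map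
                (fun j => (i, i * PySem.Int.floordiv e s + j + min i (PySem.Int.mod e s)))) := by
            rw [PySem.List.foldl_append_eq_flatMap, List.nil_append]
        _ = _ := by
            have hst : ((s.toNat : Int)) = s := Int.toNat_of_nonneg (by omega)
            have := pv_main s e hs hse s.toNat (by omega)
            rw [hst] at this
            rw [this]
            have heq : s * PySem.Int.floordiv e s + min s (PySem.Int.mod e s) = e := by
              have hrs : PySem.Int.mod e s < s := PySem.Int.mod_lt e hs
              rw [min_eq_right (le_of_lt hrs),
                  show s * PySem.Int.floordiv e s = PySem.Int.floordiv e s * s by ring,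
                  PySem.Int.floordiv_mul_add_mod]
            rw [heq, PySem.List.foldl_append_singleton_eq_map, List.nil_append]
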